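-- pv_equiv track=rewrite | github.com/liyxianren/scf | modules/auth/availability_ai_services.py | _dedupe_weekly_slots
-- ===== SOURCE A (Python) =====
-- def _dedupe_weekly_slots(slots):
--     seen = set()
--     deduped = []
--     for slot in slots:
--         key = (slot['day'], slot['start'], slot['end'])
--         if key in seen:
--             continue
--         seen.add(key)
--         deduped.append(slot)
--     return sorted(deduped, key=lambda item: (item['day'], item['start'], item['end']))
-- ===== SOURCE B (Python) =====
-- def _dedupe_weekly_slots(slots):
--     ordered = sorted(slots, key=lambda item: (item['day'], item['start'], item['end']))
--     result = []
--     prev = None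
--     for slot in ordered:
--         key = (slot['day'], slot['start'], slot['end'])
--         if not result or key != prev:
--             result.append(slot)
--             prev = key
--     return result
-- ===== Notes on version B (the rewrite author's own statement) =====
-- stated objective: alternative
-- what changed: A dedupes first-seen keys with a set and then sorts the survivors; B sorts the whole list first (stable sort) and removes duplicates in one adjacent pass tracking the previous key.
import Mathlib
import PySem

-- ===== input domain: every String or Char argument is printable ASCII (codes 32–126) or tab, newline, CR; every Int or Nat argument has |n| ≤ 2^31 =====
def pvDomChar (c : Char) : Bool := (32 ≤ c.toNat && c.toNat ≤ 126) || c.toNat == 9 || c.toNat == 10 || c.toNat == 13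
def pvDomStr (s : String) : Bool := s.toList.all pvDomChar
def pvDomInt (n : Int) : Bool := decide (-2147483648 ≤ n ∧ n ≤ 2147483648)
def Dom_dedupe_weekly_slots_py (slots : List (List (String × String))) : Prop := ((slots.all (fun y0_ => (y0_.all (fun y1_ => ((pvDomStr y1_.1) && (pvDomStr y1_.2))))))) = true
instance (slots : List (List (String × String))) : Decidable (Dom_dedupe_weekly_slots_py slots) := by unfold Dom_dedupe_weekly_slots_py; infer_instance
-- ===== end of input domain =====

-- B replaces A's set-based dedup-then-sort by sort-first plus one adjacent-dedup pass (objective: alternative decomposition, same cost).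
-- Pre_ excludes exactly the inputs where the Python raises KeyError (a slot missing one of 'day'/'start'/'end').

-- ===== PORT A =====
-- shared key helpers: under Pre_ every key is present, so getD equals the Python lookup slot['day'] etc.
def pvKey0 (slot : List (String × String)) : String × String × String :=
  (PySem.Dict.getD (PySem.Dict.mk slot) "day" "", PySem.Dict.getD (PySem.Dict.mk slot) "start" "", PySem.Dict.getD (PySem.Dict.mk slot) "end" "")
-- Python's tuple key (day, start, end): the lexicographic order on the triple, encoded with Lex (exact for Python's tuple <)
def pvKey (slot : List (String × String)) : Lex (String × Lex (String × String)) :=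
  toLex ((pvKey0 slot).1, toLex ((pvKey0 slot).2.1, (pvKey0 slot).2.2))

def dedupe_weekly_slots_py (slots : List (List (String × String))) : List (List (String × String)) :=
  let r := slots.foldl (fun (st : PySem.Set (String × String × String) × List (List (String × String))) slot =>
      if PySem.Set.contains st.1 (pvKey0 slot) then st
      else (PySem.Set.add st.1 (pvKey0 slot), st.2 ++ [slot]))
    (PySem.Set.empty, [])
  PySem.List.sorted r.2 pvKey false

-- ===== PORT B =====
def dedupe_weekly_slots_py_alt (slots : List (List (String × String))) : List (List (String × String)) :=
  let ordered := PySem.List.sorted slots pvKey false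
  (ordered.foldl (fun (st : List (List (String × String)) × Option (String × String × String)) slot =>
      if st.1.isEmpty || some (pvKey0 slot) != st.2 then (st.1 ++ [slot], some (pvKey0 slot)) else st)
    ([], none)).1

-- ===== PRECONDITION & SPEC =====
def Pre_dedupe_weekly_slots_py (slots : List (List (String × String))) : Prop :=
  (slots.all (fun s => (PySem.Dict.get? (PySem.Dict.mk s) "day").isSome && (PySem.Dict.get? (PySem.Dict.mk s) "start").isSome && (PySem.Dict.get? (PySem.Dict.mk s) "end").isSome)) = true
instance (slots : List (List (String × String))) : Decidable (Pre_dedupe_weekly_slots_py slots) := by unfold Pre_dedupe_weekly_slots_py; infer_instance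

def pvWitness_dedupe_weekly_slots_py : (List (List (String × String))) :=
  [[("day", "Mon"), ("start", "09:00"), ("end", "10:00")], [("day", "Mon"), ("start", "09:00"), ("end", "10:00")]]

def Spec_dedupe_weekly_slots_py (slots : List (List (String × String))) (out : List (List (String × String))) : Prop := out = dedupe_weekly_slots_py_alt slots
instance (slots : List (List (String × String))) (out : List (List (String × String))) : Decidable (Spec_dedupe_weekly_slots_py slots out) := by unfold Spec_dedupe_weekly_slots_py; infer_instance

-- ===== CLAIM (what is proved, stated in full; the proofs are below) =====
def Claim_equal_dedupe_weekly_slots_py : Prop := ∀ (slots : List (List (String × String))), Dom_dedupe_weekly_slots_py slots → Pre_dedupe_weekly_slots_py slots → Spec_dedupe_weekly_slots_py slots (dedupe_weekly_slots_py slots)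

-- ===== LEMMAS AND PROOFS =====

-- the tuple encoding used by pvKey, and its injectivity
def pvEnc (u : String × String × String) : Lex (String × Lex (String × String)) :=
  toLex (u.1, toLex (u.2.1, u.2.2))

theorem pvEnc_inj (u v : String × String × String) : pvEnc u = pvEnc v ↔ u = v := by
  rcases u with ⟨a, b, c⟩; rcases v with ⟨d, e, f⟩
  simp [pvEnc, Prod.ext_iff]

theorem pvKey_eq_enc (slot : List (String × String)) : pvKey slot = pvEnc (pvKey0 slot) := rfl

-- first-occurrence dedup by key, structurally
def pvDD {α κ : Type} [DecidableEq κ] (kf : α → κ) : List α → List α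
  | [] => []
  | y :: ys => y :: pvDD kf (ys.filter (fun z => decide (kf z ≠ kf y)))
  termination_by l => l.length
  decreasing_by simp; exact le_trans (List.length_filter_le _ _) (by simp)

-- adjacent dedup (B's pass), with the previous kept key
def pvAdjFrom {α κ : Type} [DecidableEq κ] (kf : α → κ) (p : κ) : List α → List α
  | [] => []
  | y :: ys => if kf y = p then pvAdjFrom kf p ys else y :: pvAdjFrom kf (kf y) ys

def pvAdjTop {α κ : Type} [DecidableEq κ] (kf : α → κ) : List α → List α
  | [] => []
  | h :: t => h :: pvAdjFrom kf (kf h) t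

-- ---- insertBy equations and facts ----
theorem insertBy_nil {α : Type} (bf : α → α → Bool) (x : α) : PySem.List.insertBy bf x [] = [x] := rfl

theorem insertBy_cons {α : Type} (bf : α → α → Bool) (x y : α) (ys : List α) :
    PySem.List.insertBy bf x (y :: ys) = if bf x y then x :: y :: ys else y :: PySem.List.insertBy bf x ys := rfl

theorem insertBy_forall_before {α : Type} (bf : α → α → Bool) (x : α) (l : List α)
    (h : ∀ w ∈ l, bf x w = true) : PySem.List.insertBy bf x l = x :: l := by
  cases l with
  | nil => rfl
  | cons y ys => rw [insertBy_cons, if_pos (h y (by simp))]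

theorem filter_insertBy_neg {α : Type} (bf : α → α → Bool) (p : α → Bool) (x : α) (l : List α)
    (hx : p x = false) : (PySem.List.insertBy bf x l).filter p = l.filter p := by
  induction l with
  | nil => simp [insertBy_nil, hx]
  | cons y ys ih =>
    rw [insertBy_cons]
    by_cases h : bf x y = true
    · simp [h, hx]
    · simp only [h]
      by_cases hy : p y = true <;> simp [hy, ih]

theorem filter_insertBy_pos {α κ : Type} [LinearOrder κ] (kf : α → κ) (p : α → Bool) (x : α) (l : List α)
    (hs : l.Pairwise (fun a b => kf a ≤ kf b)) (hx : p x = true) :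
    (PySem.List.insertBy (fun a b => decide (kf a < kf b)) x l).filter p
      = PySem.List.insertBy (fun a b => decide (kf a < kf b)) x (l.filter p) := by
  induction l with
  | nil => simp [insertBy_nil, hx]
  | cons z zs ih =>
    rcases List.pairwise_cons.1 hs with ⟨hz, hzs⟩
    rw [insertBy_cons]
    by_cases h : kf x < kf z
    · simp only [decide_eq_true_eq] at *
      rw [if_pos (by simpa using h)]
      by_cases hpz : p z = true
      · simp [hx, hpz, insertBy_cons, h]
      · have hfb : ∀ w ∈ zs.filter p, (fun a b => decide (kf a < kf b)) x w = true := by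
          intro w hw
          have hw' := List.mem_of_mem_filter hw
          simpa using lt_of_lt_of_le h (hz w hw')
        simp [hx, hpz,
          insertBy_forall_before (fun a b => decide (kf a < kf b)) x (zs.filter p) hfb]
    · rw [if_neg (by simpa using h)]
      by_cases hpz : p z = true
      · simp [hpz, ih hzs, insertBy_cons, h]
      · simp [hpz, ih hzs]

-- ---- pvDD facts ----
theorem pvDD_append_singleton {α κ : Type} [DecidableEq κ] (kf : α → κ) :
    ∀ (l : List α) (x : α), pvDD kf (l ++ [x]) =
      if kf x ∈ l.map kf then pvDD kf l else pvDD kf l ++ [x] := by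
  suffices H : ∀ (n : Nat) (l : List α), l.length ≤ n → ∀ (x : α), pvDD kf (l ++ [x]) =
      if kf x ∈ l.map kf then pvDD kf l else pvDD kf l ++ [x] by
    intro l x; exact H l.length l le_rfl x
  intro n
  induction n with
  | zero =>
    intro l hl x
    have : l = [] := List.length_eq_zero_iff.1 (Nat.le_zero.1 hl)
    subst this; simp [pvDD]
  | succ n ih =>
    intro l hl x
    cases l with
    | nil => simp [pvDD]
    | cons y ys =>
      simp only [List.length_cons, Nat.succ_le_succ_iff] at hl
      by_cases hxy : kf x = kf y
      · rw [if_pos (by simp [hxy])]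
        show pvDD kf (y :: (ys ++ [x])) = _
        rw [pvDD, pvDD]
        congr 1
        rw [List.filter_append]
        simp [hxy]
      · show pvDD kf (y :: (ys ++ [x])) = _
        rw [pvDD, pvDD, List.filter_append]
        have hfx : List.filter (fun z => decide (kf z ≠ kf y)) [x] = [x] := by simp [hxy]
        rw [hfx, ih _ (le_trans (List.length_filter_le _ _) hl) x]
        have hmem : (kf x ∈ (ys.filter (fun z => decide (kf z ≠ kf y))).map kf) ↔ kf x ∈ (y :: ys).map kf := by
          simp only [List.map_cons, List.mem_cons, List.mem_map, List.mem_filter, decide_eq_true_eq]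
          constructor
          · rintro ⟨z, ⟨hz, _⟩, hzx⟩; exact Or.inr ⟨z, hz, hzx⟩
          · rintro (h | ⟨z, hz, hzx⟩)
            · exact absurd h hxy
            · exact ⟨z, ⟨hz, by rw [hzx]; exact hxy⟩, hzx⟩
        by_cases hm : kf x ∈ (y :: ys).map kf
        · rw [if_pos (hmem.2 hm), if_pos hm]
        · rw [if_neg (fun c => hm (hmem.1 c)), if_neg hm]; simp

theorem pvDD_insertBy_mem {α κ : Type} [LinearOrder κ] (kf : α → κ) :
    ∀ (l : List α) (x : α), l.Pairwise (fun a b => kf a ≤ kf b) → kf x ∈ l.map kf →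
      pvDD kf (PySem.List.insertBy (fun a b => decide (kf a < kf b)) x l) = pvDD kf l := by
  suffices H : ∀ (n : Nat) (l : List α), l.length ≤ n → ∀ (x : α),
      l.Pairwise (fun a b => kf a ≤ kf b) → kf x ∈ l.map kf →
      pvDD kf (PySem.List.insertBy (fun a b => decide (kf a < kf b)) x l) = pvDD kf l by
    intro l x hs hm; exact H l.length l le_rfl x hs hm
  intro n
  induction n with
  | zero =>
    intro l hl x _ hm
    have : l = [] := List.length_eq_zero_iff.1 (Nat.le_zero.1 hl)
    subst this; simp at hm
  | succ n ih =>
    intro l hl x hs hm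
    cases l with
    | nil => simp at hm
    | cons z zs =>
      simp only [List.length_cons, Nat.succ_le_succ_iff] at hl
      rcases List.pairwise_cons.1 hs with ⟨hz, hzs⟩
      rw [insertBy_cons]
      by_cases h : kf x < kf z
      · exfalso
        rcases List.mem_map.1 hm with ⟨w, hw, hwx⟩
        rcases List.mem_cons.1 hw with rfl | hw'
        · exact absurd hwx (ne_of_gt h)
        · exact absurd (hwx ▸ hz w hw') (not_le_of_gt h)
      · rw [if_neg (by simpa using h)]
        by_cases hxz : kf x = kf z
        · rw [pvDD, pvDD]
          congr 1
          rw [filter_insertBy_neg _ _ _ _ (by simp [hxz])]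
        · have hm' : kf x ∈ (zs.filter (fun w => decide (kf w ≠ kf z))).map kf := by
            rcases List.mem_map.1 hm with ⟨w, hw, hwx⟩
            rcases List.mem_cons.1 hw with rfl | hw'
            · exact absurd hwx.symm hxz
            · exact List.mem_map.2 ⟨w, List.mem_filter.2 ⟨hw', by simpa [hwx] using hxz⟩, hwx⟩
          rw [pvDD, pvDD]
          congr 1
          rw [filter_insertBy_pos kf _ _ _ hzs (by simp [hxz]),
            ih _ (le_trans (List.length_filter_le _ _) hl) x (hzs.filter _) hm']

theorem pvDD_insertBy_not_mem {α κ : Type} [LinearOrder κ] (kf : α → κ) :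
    ∀ (l : List α) (x : α), l.Pairwise (fun a b => kf a ≤ kf b) → kf x ∉ l.map kf →
      pvDD kf (PySem.List.insertBy (fun a b => decide (kf a < kf b)) x l)
        = PySem.List.insertBy (fun a b => decide (kf a < kf b)) x (pvDD kf l) := by
  suffices H : ∀ (n : Nat) (l : List α), l.length ≤ n → ∀ (x : α),
      l.Pairwise (fun a b => kf a ≤ kf b) → kf x ∉ l.map kf →
      pvDD kf (PySem.List.insertBy (fun a b => decide (kf a < kf b)) x l)
        = PySem.List.insertBy (fun a b => decide (kf a < kf b)) x (pvDD kf l) by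
    intro l x hs hm; exact H l.length l le_rfl x hs hm
  intro n
  induction n with
  | zero =>
    intro l hl x _ _
    have : l = [] := List.length_eq_zero_iff.1 (Nat.le_zero.1 hl)
    subst this; simp [insertBy_nil, pvDD]
  | succ n ih =>
    intro l hl x hs hm
    cases l with
    | nil => simp [insertBy_nil, pvDD]
    | cons z zs =>
      simp only [List.length_cons, Nat.succ_le_succ_iff] at hl
      rcases List.pairwise_cons.1 hs with ⟨hz, hzs⟩
      have hxz : kf x ≠ kf z := fun c => hm (by simp [c])
      rw [insertBy_cons]
      by_cases h : kf x < kf z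
      · rw [if_pos (by simpa using h)]
        have hflt : (z :: zs).filter (fun w => decide (kf w ≠ kf x)) = z :: zs := by
          apply List.filter_eq_self.2
          intro w hw
          rcases List.mem_cons.1 hw with rfl | hw'
          · simp [Ne.symm hxz]
          · simpa using ne_of_gt (lt_of_lt_of_le h (hz w hw'))
        rw [pvDD, hflt, pvDD]
        rw [insertBy_cons, if_pos (by simpa using h)]
      · rw [if_neg (by simpa using h)]
        have hm' : kf x ∉ (zs.filter (fun w => decide (kf w ≠ kf z))).map kf := by
          intro c
          rcases List.mem_map.1 c with ⟨w, hw, hwx⟩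
          exact hm (by simp [List.mem_map]; exact Or.inr ⟨w, List.mem_of_mem_filter hw, hwx⟩)
        rw [pvDD, pvDD]
        rw [filter_insertBy_pos kf _ _ _ hzs (by simp [hxz]),
          ih _ (le_trans (List.length_filter_le _ _) hl) x (hzs.filter _) hm']
        rw [insertBy_cons, if_neg (by simpa using h)]

theorem sorted_append_singleton {α κ : Type} [LinearOrder κ] (kf : α → κ) (xs : List α) (x : α) :
    PySem.List.sorted (xs ++ [x]) kf
      = PySem.List.insertBy (fun a b => decide (kf a < kf b)) x (PySem.List.sorted xs kf) := by
  rw [PySem.List.sorted_eq_foldl_insertBy, PySem.List.sorted_eq_foldl_insertBy, List.foldl_append]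
  rfl

-- ---- crux: sorting commutes with first-occurrence dedup (stability of Python's sort) ----
theorem sorted_pvDD {α κ : Type} [LinearOrder κ] (kf : α → κ) (xs : List α) :
    PySem.List.sorted (pvDD kf xs) kf = pvDD kf (PySem.List.sorted xs kf) := by
  induction xs using List.reverseRecOn with
  | nil =>
    have h0 : PySem.List.sorted ([] : List α) kf = [] := (PySem.List.sorted_eq_nil_iff [] kf false).2 rfl
    simp [pvDD, h0]
  | append_singleton xs x ih =>
    have hpair := PySem.List.sorted_pairwise xs kf
    have hmem : (kf x ∈ (PySem.List.sorted xs kf).map kf) ↔ kf x ∈ xs.map kf :=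
      ((PySem.List.sorted_perm xs kf false).map kf).mem_iff
    rw [sorted_append_singleton, pvDD_append_singleton]
    by_cases hm : kf x ∈ xs.map kf
    · rw [if_pos hm, ih, pvDD_insertBy_mem kf _ _ hpair (hmem.2 hm)]
    · rw [if_neg hm, sorted_append_singleton, ih,
        pvDD_insertBy_not_mem kf _ _ hpair (fun c => hm (hmem.1 c))]

-- ---- adjacent dedup equals first-occurrence dedup on a key-sorted list ----
theorem pvAdjFrom_eq {α κ : Type} [LinearOrder κ] (kf : α → κ) :
    ∀ (t : List α) (p : κ), t.Pairwise (fun a b => kf a ≤ kf b) → (∀ z ∈ t, p ≤ kf z) →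
      pvAdjFrom kf p t = pvAdjTop kf (t.filter (fun z => decide (kf z ≠ p))) := by
  intro t
  induction t with
  | nil => intro p _ _; simp [pvAdjFrom, pvAdjTop]
  | cons y ys ih =>
    intro p hs hlb
    rcases List.pairwise_cons.1 hs with ⟨hy, hys⟩
    by_cases h : kf y = p
    · rw [pvAdjFrom, if_pos h, List.filter_cons_of_neg (by simp [h]),
        ih p hys (fun z hz => hlb z (List.mem_cons_of_mem y hz))]
    · have hlt : p < kf y := lt_of_le_of_ne (hlb y (List.mem_cons_self)) (fun c => h c.symm)
      have hfid : ys.filter (fun z => decide (kf z ≠ p)) = ys := by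
        apply List.filter_eq_self.2
        intro w hw
        simpa using ne_of_gt (lt_of_lt_of_le hlt (hy w hw))
      rw [pvAdjFrom, if_neg h, List.filter_cons_of_pos (by simp [h]), pvAdjTop, hfid]

theorem pvAdjTop_eq_pvDD {α κ : Type} [LinearOrder κ] (kf : α → κ) :
    ∀ (S : List α), S.Pairwise (fun a b => kf a ≤ kf b) → pvAdjTop kf S = pvDD kf S := by
  suffices H : ∀ (n : Nat) (S : List α), S.length ≤ n →
      S.Pairwise (fun a b => kf a ≤ kf b) → pvAdjTop kf S = pvDD kf S by
    intro S hs; exact H S.length S le_rfl hs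
  intro n
  induction n with
  | zero =>
    intro S hl _
    have : S = [] := List.length_eq_zero_iff.1 (Nat.le_zero.1 hl)
    subst this; simp [pvAdjTop, pvDD]
  | succ n ih =>
    intro S hl hs
    cases S with
    | nil => simp [pvAdjTop, pvDD]
    | cons h t =>
      simp only [List.length_cons, Nat.succ_le_succ_iff] at hl
      rcases List.pairwise_cons.1 hs with ⟨hh, hts⟩
      rw [pvAdjTop, pvAdjFrom_eq kf t (kf h) hts hh, pvDD,
        ih _ (le_trans (List.length_filter_le _ _) hl) (hts.filter _)]

-- ---- the two loops ----
theorem loopA_spec :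
    ∀ (xs : List (List (String × String))) (seen : PySem.Set (String × String × String)) (acc : List (List (String × String))),
      (xs.foldl (fun (st : PySem.Set (String × String × String) × List (List (String × String))) slot =>
          if PySem.Set.contains st.1 (pvKey0 slot) then st
          else (PySem.Set.add st.1 (pvKey0 slot), st.2 ++ [slot])) (seen, acc)).2
        = acc ++ pvDD pvKey (xs.filter (fun z => !(PySem.Set.contains seen (pvKey0 z)))) := by
  intro xs
  induction xs with
  | nil => intro seen acc; simp [pvDD]
  | cons y xs ih =>
    intro seen acc
    rw [List.foldl_cons, List.filter_cons]
    by_cases hc : PySem.Set.contains seen (pvKey0 y) = true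
    · rw [if_pos hc, ih seen acc]
      have hm : pvKey0 y ∈ seen := by simpa [PySem.Set.contains] using hc
      simp [hm]
    · rw [if_neg hc, ih (PySem.Set.add seen (pvKey0 y)) (acc ++ [y]),
        if_pos (by simpa [PySem.Set.contains] using hc), pvDD, List.filter_filter, List.append_assoc, List.singleton_append]
      refine congrArg _ (congrArg _ (congrArg _ (List.filter_congr ?_)))
      intro z _
      have hm0 : pvKey0 y ∉ seen := by simpa [PySem.Set.contains] using hc
      have hadd : PySem.Set.add seen (pvKey0 y) = seen ++ [pvKey0 y] := by
        simp [PySem.Set.add, PySem.Set.contains, hm0]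
      have hk : (pvKey z ≠ pvKey y) ↔ ¬ (pvKey0 z = pvKey0 y) := by
        rw [pvKey_eq_enc, pvKey_eq_enc, not_iff_not, pvEnc_inj]
      rw [hadd]
      by_cases hz : pvKey0 z = pvKey0 y
      · simp [PySem.Set.contains, hz, hk]
      · simp [PySem.Set.contains, hz, hk]

theorem loopB_spec :
    ∀ (ys : List (List (String × String))) (res : List (List (String × String))) (p : String × String × String), res ≠ [] →
      (ys.foldl (fun (st : List (List (String × String)) × Option (String × String × String)) slot =>
          if st.1.isEmpty || some (pvKey0 slot) != st.2 then (st.1 ++ [slot], some (pvKey0 slot)) else st) (res, some p)).1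
        = res ++ pvAdjFrom pvKey (pvEnc p) ys := by
  intro ys
  induction ys with
  | nil => intro res p _; simp [pvAdjFrom]
  | cons y ys ih =>
    intro res p hres
    rw [List.foldl_cons]
    by_cases h : pvKey0 y = p
    · rw [if_neg (by simp [List.isEmpty_iff, hres, h]), ih res p hres,
        pvAdjFrom, if_pos (by rw [pvKey_eq_enc, h])]
    · rw [if_pos (by simp [h]), ih (res ++ [y]) (pvKey0 y) (by simp),
        pvAdjFrom, if_neg (by rw [pvKey_eq_enc]; exact fun c => h (pvEnc_inj _ _ |>.1 c)),
        List.append_assoc, List.singleton_append]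
      rfl

theorem portA_eq (slots : List (List (String × String))) :
    dedupe_weekly_slots_py slots = PySem.List.sorted (pvDD pvKey slots) pvKey := by
  show PySem.List.sorted (slots.foldl _ (PySem.Set.empty, [])).2 pvKey false = _
  rw [loopA_spec]
  simp [PySem.Set.contains, PySem.Set.empty]

theorem portB_eq (slots : List (List (String × String))) :
    dedupe_weekly_slots_py_alt slots = pvAdjTop pvKey (PySem.List.sorted slots pvKey) := by
  show (List.foldl _ ([], none) (PySem.List.sorted slots pvKey false)).1 = _
  cases h : PySem.List.sorted slots pvKey false with
  | nil => simp [pvAdjTop]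
  | cons hd t =>
    rw [List.foldl_cons]
    exact (loopB_spec t [hd] (pvKey0 hd) (by simp)).trans rfl

-- ===== VERDICT (by name: the statement is the Claim_ definition above) =====
theorem dedupe_weekly_slots_py_spec : Claim_equal_dedupe_weekly_slots_py := by
  intro slots _ _
  show dedupe_weekly_slots_py slots = dedupe_weekly_slots_py_alt slots
  rw [portA_eq, portB_eq, sorted_pvDD, pvAdjTop_eq_pvDD _ _ (PySem.List.sorted_pairwise slots pvKey)]
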